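-- pv_equiv track=rewrite | github.com/djudwin/AI_Propect1 | Search.py | makeGraphWithWeights
-- ===== SOURCE A (Python) =====
-- def makeGraphWithWeights(inputList):
-- 	graphDict = {}
-- 	loopCounter = 0
-- 	firstNumber = -1
-- 	secondNumber = -1
-- 	thirdNumber = -1
-- 	for i in inputList:
-- 		if (loopCounter == 0):
-- 			firstNumber = i
-- 			loopCounter += 1
-- 		elif (loopCounter == 1):
-- 			secondNumber = i
-- 			loopCounter += 1
-- 		elif (loopCounter == 2):
-- 			thirdNumber = i
-- 			loopCounter = 0
--
-- 			if (firstNumber in graphDict):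
-- 				temp = graphDict[firstNumber]
-- 				graphDict[firstNumber][secondNumber] = thirdNumber
-- 			else:
-- 				graphDict[firstNumber] = {secondNumber: thirdNumber}
-- 	return(graphDict)
-- ===== SOURCE B (Python) =====
-- def makeGraphWithWeights(inputList):
--     # Stage 1: chunk the flat list into complete triples (leftovers dropped).
--     triples = []
--     rest = inputList
--     while len(rest) >= 3:
--         triples.append((rest[0], rest[1], rest[2]))
--         rest = rest[3:]
--     # Stage 2: group-by construction — for each source node in order of first
--     # appearance, build its whole inner dict by scanning the triples for it.
--     graphDict = {}
--     for t in triples: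
--         a = t[0]
--         if a not in graphDict:
--             inner = {}
--             for x, b, c in triples:
--                 if x == a:
--                     inner[b] = c
--             graphDict[a] = inner
--     return graphDict
-- ===== Notes on version B (the rewrite author's own statement) =====
-- stated objective: alternative
-- what changed: Replaces A's single-pass loopCounter state machine that inserts into the nested dict incrementally by a two-stage group-by: first chunk the list into triples, then for each source node at its first appearance build its complete inner dict with a dedicated scan over the triples; it trades A's linear single pass for a clearer grouped construction that rescans the triples per distinct source node.
import Mathlib
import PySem

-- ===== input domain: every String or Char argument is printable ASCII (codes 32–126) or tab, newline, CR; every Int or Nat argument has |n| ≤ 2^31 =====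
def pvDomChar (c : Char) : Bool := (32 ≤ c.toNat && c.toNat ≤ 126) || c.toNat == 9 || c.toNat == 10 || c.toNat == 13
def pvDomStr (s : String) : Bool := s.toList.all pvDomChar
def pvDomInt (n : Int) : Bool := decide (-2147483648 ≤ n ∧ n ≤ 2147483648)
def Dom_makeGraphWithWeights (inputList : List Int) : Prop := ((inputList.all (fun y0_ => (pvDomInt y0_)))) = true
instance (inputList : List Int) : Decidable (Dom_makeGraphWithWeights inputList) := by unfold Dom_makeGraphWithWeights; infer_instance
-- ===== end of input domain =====

-- B replaces A's single-pass loopCounter state machine by a two-stage group-by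
-- (chunk into triples, then build each source node's whole inner dict by its own
-- scan over the triples); same return value on every input, at the cost of one
-- rescan per distinct source node.

-- ===== PORT A =====
-- one loop step of A: state = (graphDict, loopCounter, firstNumber, secondNumber, thirdNumber)
def aStep (st : PySem.Dict Int (PySem.Dict Int Int) × Int × Int × Int × Int) (i : Int) :
    PySem.Dict Int (PySem.Dict Int Int) × Int × Int × Int × Int :=
  match st with
  | (d, lc, fn, sn, tn) =>
    if lc = 0 then (d, lc + 1, i, sn, tn)
    else if lc = 1 then (d, lc + 1, fn, i, tn)
    else if lc = 2 then
      -- graphDict[firstNumber][secondNumber] = thirdNumber (key present, guarded by contains)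
      if d.contains fn then (d.insert fn ((d.getD fn PySem.Dict.empty).insert sn i), 0, fn, sn, i)
      else (d.insert fn (PySem.Dict.ofList [(sn, i)]), 0, fn, sn, i)
    else (d, lc, fn, sn, tn)

def makeGraphWithWeights (inputList : List Int) : List (Int × List (Int × Int)) :=
  ((inputList.foldl aStep (PySem.Dict.empty, 0, -1, -1, -1)).1.items.map
    (fun p => (p.1, p.2.items)))

-- ===== PORT B =====
-- stage 1: 'while len(rest) >= 3: triples.append((rest[0],rest[1],rest[2])); rest = rest[3:]'
def bTriples : List Int → List (Int × Int × Int)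
  | a :: b :: c :: rest => (a, b, c) :: bTriples rest
  | _ => []

-- the inner loop: 'for x, b, c in triples: if x == a: inner[b] = c'
def bInner (ts : List (Int × Int × Int)) (a : Int) : PySem.Dict Int Int :=
  ts.foldl (fun inner u => if u.1 == a then inner.insert u.2.1 u.2.2 else inner)
    PySem.Dict.empty

-- one step of the outer loop: 'if a not in graphDict: … graphDict[a] = inner'
def bOuterStep (ts : List (Int × Int × Int))
    (g : PySem.Dict Int (PySem.Dict Int Int)) (t : Int × Int × Int) :
    PySem.Dict Int (PySem.Dict Int Int) :=
  if g.contains t.1 then g else g.insert t.1 (bInner ts t.1)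

def makeGraphWithWeights_alt (inputList : List Int) : List (Int × List (Int × Int)) :=
  let ts := bTriples inputList
  (ts.foldl (bOuterStep ts) PySem.Dict.empty).items.map (fun p => (p.1, p.2.items))

-- ===== PRECONDITION & SPEC =====
def Spec_makeGraphWithWeights (inputList : List Int) (out : List (Int × List (Int × Int))) : Prop := out = makeGraphWithWeights_alt inputList
instance (inputList : List Int) (out : List (Int × List (Int × Int))) : Decidable (Spec_makeGraphWithWeights inputList out) := by unfold Spec_makeGraphWithWeights; infer_instance

-- ===== CLAIM (what is proved, stated in full; the proofs are below) =====
def Claim_equal_makeGraphWithWeights : Prop := ∀ (inputList : List Int), Dom_makeGraphWithWeights inputList → Spec_makeGraphWithWeights inputList (makeGraphWithWeights inputList)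

-- ===== LEMMAS AND PROOFS =====

-- A's per-triple step, extracted from the state machine
def aTripleStep (d : PySem.Dict Int (PySem.Dict Int Int)) (t : Int × Int × Int) :
    PySem.Dict Int (PySem.Dict Int Int) :=
  if d.contains t.1 then d.insert t.1 ((d.getD t.1 PySem.Dict.empty).insert t.2.1 t.2.2)
  else d.insert t.1 (PySem.Dict.ofList [(t.2.1, t.2.2)])

-- A's state machine over the flat list is the triple-step fold over the chunked triples
theorem aFold_eq_tripleFold : ∀ (l : List Int) (d : PySem.Dict Int (PySem.Dict Int Int)) (f s t : Int),
    (l.foldl aStep (d, 0, f, s, t)).1 = (bTriples l).foldl aTripleStep d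
  | [], d, f, s, t => rfl
  | [a], d, f, s, t => by
    simp only [List.foldl, aStep]
    norm_num
    rfl
  | [a, b], d, f, s, t => by
    simp only [List.foldl, aStep]
    norm_num
    rfl
  | a :: b :: c :: rest, d, f, s, t => by
    simp only [List.foldl, aStep, bTriples]
    norm_num
    by_cases h : d.contains a = true
    · rw [if_pos h, aFold_eq_tripleFold rest _ a b c]
      congr 1
      simp only [aTripleStep]
      rw [if_pos h]
    · rw [if_neg (by simpa using h), aFold_eq_tripleFold rest _ a b c]
      congr 1
      simp only [aTripleStep]
      rw [if_neg (by simpa using h)]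

-- the ordered-dedup update on a plain key list (what both outer loops do to the keys)
def keyUpd (ks : List Int) (xs : List Int) : List Int :=
  xs.foldl (fun ks x => if x ∈ ks then ks else ks ++ [x]) ks

theorem keyUpd_nodup : ∀ (xs ks : List Int), ks.Nodup → (keyUpd ks xs).Nodup
  | [], ks, h => h
  | x :: xs, ks, h => by
    simp only [keyUpd, List.foldl_cons]
    by_cases hx : x ∈ ks
    · rw [if_pos hx]
      exact keyUpd_nodup xs ks h
    · rw [if_neg hx]
      exact keyUpd_nodup xs (ks ++ [x]) (by simp only [List.nodup_append]; refine ⟨h, List.nodup_singleton x, fun b hb => ?_⟩; simp; exact fun he => hx (he ▸ hb))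

theorem mem_keyUpd : ∀ (xs ks : List Int) (a : Int), a ∈ keyUpd ks xs → a ∈ ks ∨ a ∈ xs
  | [], ks, a, h => Or.inl h
  | x :: xs, ks, a, h => by
    simp only [keyUpd, List.foldl_cons] at h
    rcases mem_keyUpd xs _ a h with hh | hh
    · by_cases hx : x ∈ ks
      · rw [if_pos hx] at hh
        exact Or.inl hh
      · rw [if_neg hx] at hh
        rcases List.mem_append.1 hh with h1 | h1
        · exact Or.inl h1
        · have : a = x := by simpa using h1
          exact Or.inr (by simp [this])
    · exact Or.inr (List.mem_cons_of_mem _ hh)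

theorem keys_aTripleStep (d : PySem.Dict Int (PySem.Dict Int Int)) (t : Int × Int × Int) :
    (aTripleStep d t).keys = if t.1 ∈ d.keys then d.keys else d.keys ++ [t.1] := by
  by_cases h : d.contains t.1 = true
  · simp only [aTripleStep, h, if_true]
    rw [PySem.Dict.keys_insert_of_contains d _ h,
      if_pos ((PySem.Dict.contains_iff_mem_keys d t.1).1 h)]
  · have hk : t.1 ∉ d.keys := fun hm => h ((PySem.Dict.contains_iff_mem_keys d t.1).2 hm)
    simp only [aTripleStep, h, if_false, Bool.false_eq_true]
    rw [PySem.Dict.keys_insert_of_not_contains d _ (by simpa using h), if_neg hk]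

theorem keys_bOuterStep (ts : List (Int × Int × Int)) (g : PySem.Dict Int (PySem.Dict Int Int))
    (t : Int × Int × Int) :
    (bOuterStep ts g t).keys = if t.1 ∈ g.keys then g.keys else g.keys ++ [t.1] := by
  by_cases h : g.contains t.1 = true
  · simp only [bOuterStep, h, if_true]
    rw [if_pos ((PySem.Dict.contains_iff_mem_keys g t.1).1 h)]
  · have hk : t.1 ∉ g.keys := fun hm => h ((PySem.Dict.contains_iff_mem_keys g t.1).2 hm)
    simp only [bOuterStep, h, if_false, Bool.false_eq_true]
    rw [PySem.Dict.keys_insert_of_not_contains g _ (by simpa using h), if_neg hk]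

theorem keys_aTripleFold : ∀ (ts : List (Int × Int × Int)) (d : PySem.Dict Int (PySem.Dict Int Int)),
    (ts.foldl aTripleStep d).keys = keyUpd d.keys (ts.map (·.1))
  | [], d => rfl
  | t :: ts, d => by
    simp only [List.foldl_cons, List.map_cons, keyUpd]
    rw [keys_aTripleFold ts _, keys_aTripleStep]
    rfl

theorem keys_bOuterFold : ∀ (ps ts : List (Int × Int × Int)) (g : PySem.Dict Int (PySem.Dict Int Int)),
    (ps.foldl (bOuterStep ts) g).keys = keyUpd g.keys (ps.map (·.1))
  | [], ts, g => rfl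
  | t :: ps, ts, g => by
    simp only [List.foldl_cons, List.map_cons, keyUpd]
    rw [keys_bOuterFold ps ts _, keys_bOuterStep]
    rfl

-- A's fold builds, at each key a, exactly the inner fold over all its triples
theorem getD_aTripleFold : ∀ (ts : List (Int × Int × Int)) (d : PySem.Dict Int (PySem.Dict Int Int)) (a : Int),
    (ts.foldl aTripleStep d).getD a PySem.Dict.empty =
      ts.foldl (fun inner u => if u.1 == a then inner.insert u.2.1 u.2.2 else inner)
        (d.getD a PySem.Dict.empty)
  | [], d, a => rfl
  | t :: ts, d, a => by
    simp only [List.foldl_cons]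
    rw [getD_aTripleFold ts _ a]
    congr 1
    by_cases he : t.1 = a
    · rw [show (t.1 == a) = true from by simp [he], if_pos rfl]
      subst he
      by_cases h : d.contains t.1 = true
      · rw [show aTripleStep d t = d.insert t.1 ((d.getD t.1 PySem.Dict.empty).insert t.2.1 t.2.2) from if_pos h,
          PySem.Dict.getD_insert_self]
      · rw [show aTripleStep d t = d.insert t.1 (PySem.Dict.ofList [(t.2.1, t.2.2)]) from if_neg h,
          PySem.Dict.getD_insert_self, PySem.Dict.getD_of_not_contains d _ (by simpa using h)]
        rfl
    · rw [show (t.1 == a) = false from by simp [he]]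
      simp only [Bool.false_eq_true, if_false]
      unfold aTripleStep
      split_ifs <;> rw [PySem.Dict.getD_insert_of_ne d _ _ (fun hh => he hh.symm)]
  termination_by ts => ts.length

-- a key that never occurs as a source gets the empty inner dict from the inner scan
theorem bInner_of_not_mem : ∀ (ts : List (Int × Int × Int)) (a : Int),
    a ∉ ts.map (·.1) →
    ts.foldl (fun inner u => if u.1 == a then inner.insert u.2.1 u.2.2 else inner)
      (PySem.Dict.empty : PySem.Dict Int Int) = PySem.Dict.empty
  | [], a, _ => rfl
  | t :: ts, a, h => by
    simp only [List.map_cons, List.mem_cons, not_or] at h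
    rw [List.foldl_cons, show (t.1 == a) = false from beq_eq_false_iff_ne.2 (fun hh => h.1 hh.symm)]
    simp only [Bool.false_eq_true, if_false]
    exact bInner_of_not_mem ts a h.2

-- B's outer fold looks a key up to the grouped inner dict
theorem getD_bOuterFold : ∀ (ps ts : List (Int × Int × Int)) (g : PySem.Dict Int (PySem.Dict Int Int)) (a : Int),
    (ps.foldl (bOuterStep ts) g).getD a PySem.Dict.empty =
      if g.contains a then g.getD a PySem.Dict.empty
      else if a ∈ ps.map (·.1) then bInner ts a else PySem.Dict.empty
  | [], ts, g, a => by
    by_cases h : g.contains a = true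
    · simp [h]
    · simp [h, PySem.Dict.getD_of_not_contains g _ (by simpa using h)]
  | t :: ps, ts, g, a => by
    simp only [List.foldl_cons, List.map_cons, List.mem_cons]
    by_cases h : g.contains t.1 = true
    · rw [show bOuterStep ts g t = g from if_pos h, getD_bOuterFold ps ts g a]
      by_cases ha : g.contains a = true
      · simp [ha]
      · have hat : ¬ a = t.1 := fun he => ha (he ▸ h)
        rw [if_neg ha, if_neg ha]
        by_cases hm : a ∈ ps.map (·.1)
        · rw [if_pos hm, if_pos (Or.inr hm)]
        · rw [if_neg hm, if_neg (by rintro (hh | hh); exacts [hat hh, hm hh])]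
    · rw [show bOuterStep ts g t = g.insert t.1 (bInner ts t.1) from if_neg h,
        getD_bOuterFold ps ts _ a]
      by_cases hat : a = t.1
      · subst hat
        simp [PySem.Dict.contains_insert_self, PySem.Dict.getD_insert_self, h]
      · rw [PySem.Dict.getD_insert_of_ne g _ _ hat,
          PySem.Dict.contains_insert g t.1 a (bInner ts t.1),
          show (a == t.1) = false from by simp [hat]]
        simp only [Bool.false_or]
        by_cases ha : g.contains a = true
        · rw [if_pos ha, if_pos ha]
        · rw [if_neg ha, if_neg ha]
          by_cases hm : a ∈ ps.map (·.1)
          · rw [if_pos hm, if_pos (Or.inr hm)]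
          · rw [if_neg hm, if_neg (by rintro (hh | hh); exacts [hat hh, hm hh])]
  termination_by ps => ps.length

theorem dict_eq (l : List Int) :
    (l.foldl aStep (PySem.Dict.empty, 0, -1, -1, -1)).1 =
      (bTriples l).foldl (bOuterStep (bTriples l)) PySem.Dict.empty := by
  rw [aFold_eq_tripleFold]
  set ts := bTriples l with hts
  have hkA := keys_aTripleFold ts PySem.Dict.empty
  have hkB := keys_bOuterFold ts ts PySem.Dict.empty
  have hnd : (ts.foldl aTripleStep PySem.Dict.empty).keys.Nodup := by
    rw [hkA]; exact keyUpd_nodup _ _ (by simp [PySem.Dict.keys_empty])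
  have hndB : (ts.foldl (bOuterStep ts) PySem.Dict.empty).keys.Nodup := by
    rw [hkB]; exact keyUpd_nodup _ _ (by simp [PySem.Dict.keys_empty])
  apply PySem.Dict.ext
  rw [PySem.Dict.items_eq_map_keys _ hnd PySem.Dict.empty,
    PySem.Dict.items_eq_map_keys _ hndB PySem.Dict.empty, hkA, hkB]
  apply List.map_congr_left
  intro a ha
  have hmem : a ∈ ts.map (·.1) := by
    rcases mem_keyUpd _ _ a ha with h | h
    · simp [PySem.Dict.keys_empty] at h
    · exact h
  congr 1
  rw [getD_aTripleFold, getD_bOuterFold]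
  simp only [PySem.Dict.getD_empty, PySem.Dict.contains_empty, hmem, if_pos,
    Bool.false_eq_true, if_false]
  rfl

-- ===== VERDICT (by name: the statement is the Claim_ definition above) =====
theorem makeGraphWithWeights_spec : Claim_equal_makeGraphWithWeights := by
  intro l _
  unfold Spec_makeGraphWithWeights makeGraphWithWeights makeGraphWithWeights_alt
  rw [dict_eq]
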